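-- pv_equiv track=rewrite | github.com/natescherer/postmodern-repo-copiertemplate | template/{% if is_template %}extensions{% endif %}/yaml_quote_extension.py | quote_for_yaml
-- ===== SOURCE A (Python) =====
-- def quote_for_yaml(string):
--     """Return a string wrapped in single-quotes if it contains YAML special characters."""
--     if any(
--         x in string
--         for x in (
--             ":",
--             "{",
--             "}",
--             "[",
--             "]",
--             ",",
--             "&",
--             "*",
--             "#",
--             "?",
--             "|",
--             "-",
--             "<",
--             ">",
--             "=",
--             "!",
--             "%",
--             "@",
--         )
--     ):
--         return f"'{string}'"
--     else:
--         return string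
-- ===== SOURCE B (Python) =====
-- SPECIALS = frozenset(":{}[],&*#?|-<>=!%@")
--
--
-- def quote_for_yaml(string):
--     """Return a string wrapped in single-quotes if it contains YAML special characters."""
--     if any(c in SPECIALS for c in string):
--         return f"'{string}'"
--     return string
-- ===== Notes on version B (the rewrite author's own statement) =====
-- stated objective: idiomatic
-- what changed: A iterates over the 18 special characters testing each for substring containment in the input; B scans the input string once, testing each of its characters against a constant frozenset of specials.
import Mathlib
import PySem

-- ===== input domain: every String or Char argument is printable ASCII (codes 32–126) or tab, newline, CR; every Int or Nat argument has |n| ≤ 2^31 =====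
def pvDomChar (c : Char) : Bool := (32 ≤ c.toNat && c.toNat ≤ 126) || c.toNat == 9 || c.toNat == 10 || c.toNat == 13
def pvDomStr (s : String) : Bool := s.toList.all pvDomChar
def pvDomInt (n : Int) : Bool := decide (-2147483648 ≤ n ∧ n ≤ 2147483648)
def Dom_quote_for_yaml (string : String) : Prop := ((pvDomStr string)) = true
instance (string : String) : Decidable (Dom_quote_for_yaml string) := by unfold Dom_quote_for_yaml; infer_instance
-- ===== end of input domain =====

-- B scans the string's characters once against a constant set of specials instead of
-- testing each of the 18 special characters for substring containment; same result.

-- ===== PORT A =====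
-- A: any(x in string for x in (":", "{", …)) — loop over the special characters,
-- substring test against the input; then f"'{string}'" or the string unchanged.
def quote_for_yaml (string : String) : String :=
  if ([":", "{", "}", "[", "]", ",", "&", "*", "#", "?", "|", "-", "<", ">", "=", "!", "%", "@"] : List String).any
      (fun x => PySem.Str.isIn x string)
  then String.ofList ('\'' :: (string.toList ++ ['\'']))   -- f"'{string}'"
  else string

-- ===== PORT B =====
-- SPECIALS = frozenset(":{}[],&*#?|-<>=!%@")  (a Python set of chars → PySem.Set-style distinct list)
def yamlSpecials : List Char :=
  [':', '{', '}', '[', ']', ',', '&', '*', '#', '?', '|', '-', '<', '>', '=', '!', '%', '@']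

-- B: any(c in SPECIALS for c in string) — loop over the input's characters,
-- membership test against the constant set.
def quote_for_yaml_alt (string : String) : String :=
  if string.toList.any (fun c => yamlSpecials.contains c)
  then String.ofList ('\'' :: (string.toList ++ ['\'']))   -- f"'{string}'"
  else string

-- ===== PRECONDITION & SPEC =====
def Spec_quote_for_yaml (string : String) (out : String) : Prop := out = quote_for_yaml_alt string
instance (string : String) (out : String) : Decidable (Spec_quote_for_yaml string out) := by unfold Spec_quote_for_yaml; infer_instance

-- ===== CLAIM (what is proved, stated in full; the proofs are below) =====
def Claim_equal_quote_for_yaml : Prop := ∀ (string : String), Dom_quote_for_yaml string → Spec_quote_for_yaml string (quote_for_yaml string)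

-- ===== LEMMAS AND PROOFS =====

-- A's tuple of one-character strings is exactly B's character set, viewed as strings.
theorem quote_strs_eq :
    ([":", "{", "}", "[", "]", ",", "&", "*", "#", "?", "|", "-", "<", ">", "=", "!", "%", "@"] : List String)
      = yamlSpecials.map (fun c => String.ofList [c]) := by decide

-- Python's `x in s` for a one-character string x is character membership.
theorem isIn_single (c : Char) (s : String) :
    PySem.Str.isIn (String.ofList [c]) s = s.toList.contains c := by
  apply Bool.eq_iff_iff.mpr
  simp [PySem.Chars.isIn_iff_infix, List.singleton_infix_iff]

-- The two guards agree: some special occurs in s  ↔  some character of s is special.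
theorem quote_cond_eq (s : String) :
    ([":", "{", "}", "[", "]", ",", "&", "*", "#", "?", "|", "-", "<", ">", "=", "!", "%", "@"] : List String).any
      (fun x => PySem.Str.isIn x s)
    = s.toList.any (fun c => yamlSpecials.contains c) := by
  rw [quote_strs_eq, List.any_map]
  apply Bool.eq_iff_iff.mpr
  simp only [List.any_eq_true, Function.comp, isIn_single, List.contains_eq_mem, decide_eq_true_eq]
  exact ⟨fun ⟨c, h1, h2⟩ => ⟨c, h2, h1⟩, fun ⟨c, h1, h2⟩ => ⟨c, h2, h1⟩⟩

-- ===== VERDICT (by name: the statement is the Claim_ definition above) =====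
theorem quote_for_yaml_spec : Claim_equal_quote_for_yaml := by
  intro s _
  unfold Spec_quote_for_yaml quote_for_yaml quote_for_yaml_alt
  rw [quote_cond_eq]
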